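-- pv_equiv track=rewrite | github.com/moreiratrader/BeecrowdResolucoes | Iniciante - Python/1144 sequencia logica.py | primeira
-- ===== SOURCE A (Python) =====
-- def primeira(entrada):
--     lista_1 = [1]
--     lista_2 = [1, 2]
--     for numero in range(1, entrada + 1):
--         if lista_1[-1] == numero:
--             lista_1.append(numero)
--         else:
--             lista_1.append(numero)
--             lista_1.append(numero)
--     for i, numero in enumerate(lista_1):
--         if i > 1 and i % 2 == 0:
--             multi = numero ** 2
--             lista_2.append(multi)
--
--         elif i > 1 and i % 2 != 0:
--            repetir =  lista_2[-1]
--            lista_2.append(repetir + 1)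
--     return lista_1, lista_2
-- ===== SOURCE B (Python) =====
-- def primeira(entrada):
--     lista_1 = [1]
--     lista_2 = [1, 2]
--     for k in range(1, entrada + 1):
--         lista_1.append(k)
--         if k > 1:
--             lista_1.append(k)
--             lista_2.append(k * k)
--             lista_2.append(k * k + 1)
--     return lista_1, lista_2
-- ===== Notes on version B (the rewrite author's own statement) =====
-- stated objective: simpler
-- what changed: Single loop over k=1..entrada building both lists at once, with lista_2 computed in closed form from k (k*k, k*k+1) instead of A's separate second pass that re-reads lista_1 by index parity and chains lista_2[-1]+1.
import Mathlib
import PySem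

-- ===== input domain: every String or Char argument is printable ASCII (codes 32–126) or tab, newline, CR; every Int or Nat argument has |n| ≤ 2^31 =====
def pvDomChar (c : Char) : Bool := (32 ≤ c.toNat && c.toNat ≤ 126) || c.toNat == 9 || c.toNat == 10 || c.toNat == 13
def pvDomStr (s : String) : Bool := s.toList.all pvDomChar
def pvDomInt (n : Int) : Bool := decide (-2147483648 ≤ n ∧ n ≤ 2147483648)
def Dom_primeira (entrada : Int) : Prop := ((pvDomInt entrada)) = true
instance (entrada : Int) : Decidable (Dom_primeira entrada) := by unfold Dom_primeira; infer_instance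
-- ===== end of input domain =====

-- B builds both lists in one loop, computing lista_2 directly from k (k*k, k*k+1)
-- instead of A's second pass over lista_1 by index parity; objective: simpler.

-- ===== PORT A =====
def primeira (entrada : Int) : List Int × List Int :=
  let lista1 := (PySem.List.pyRange 1 (entrada + 1) 1).foldl
    (fun l numero =>
      if (PySem.List.pyGet? l (-1)).getD 0 = numero then l ++ [numero]
      else (l ++ [numero]) ++ [numero]) [1]
  let lista2 := (PySem.List.enumerate lista1 0).foldl
    (fun l2 p =>
      if p.1 > 1 ∧ p.1 % 2 = 0 then l2 ++ [p.2 ^ 2]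
      else if p.1 > 1 ∧ p.1 % 2 ≠ 0 then l2 ++ [(PySem.List.pyGet? l2 (-1)).getD 0 + 1]
      else l2) [1, 2]
  (lista1, lista2)

-- ===== PORT B =====
def primeira_alt (entrada : Int) : List Int × List Int :=
  (PySem.List.pyRange 1 (entrada + 1) 1).foldl
    (fun st k =>
      let l1 := st.1 ++ [k]
      if k > 1 then (l1 ++ [k], st.2 ++ [k * k, k * k + 1]) else (l1, st.2))
    ([1], [1, 2])

-- ===== PRECONDITION & SPEC =====
def Spec_primeira (entrada : Int) (out : List Int × List Int) : Prop := out = primeira_alt entrada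
instance (entrada : Int) (out : List Int × List Int) : Decidable (Spec_primeira entrada out) := by unfold Spec_primeira; infer_instance

-- ===== CLAIM (what is proved, stated in full; the proofs are below) =====
def Claim_equal_primeira : Prop := ∀ (entrada : Int), Dom_primeira entrada → Spec_primeira entrada (primeira entrada)

-- ===== LEMMAS AND PROOFS =====

-- closed form both ports converge to (proof-only helper)
def G : Nat → List Int × List Int
  | 0 => ([1], [1, 2])
  | 1 => ([1, 1], [1, 2])
  | (n + 2) =>
      let p := G (n + 1)
      (p.1 ++ [(n : Int) + 2, (n : Int) + 2],
       p.2 ++ [((n : Int) + 2) * ((n : Int) + 2), ((n : Int) + 2) * ((n : Int) + 2) + 1])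

theorem G_fst_length : ∀ m : Nat, (G (m + 1)).1.length = 2 * (m + 1) := by
  intro m
  induction m with
  | zero => simp [G]
  | succ k ih => simp [G, ih]; omega

theorem G_fst_last : ∀ m : Nat,
    (PySem.List.pyGet? (G (m + 1)).1 (-1)).getD 0 = (m : Int) + 1 := by
  intro m
  induction m with
  | zero => decide
  | succ k ih =>
      show (PySem.List.pyGet? ((G (k+1)).1 ++ [(k : Int) + 2, (k : Int) + 2]) (-1)).getD 0 = _
      rw [show (G (k+1)).1 ++ [(k : Int) + 2, (k : Int) + 2]
            = ((G (k+1)).1 ++ [(k : Int) + 2]) ++ [(k : Int) + 2] by simp]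
      rw [PySem.List.pyGet?_neg_one_append_singleton]
      simp only [Option.getD_some]; push_cast; ring

-- B's fold equals G
theorem alt_eq_G : ∀ m : Nat, primeira_alt (m : Int) = G m := by
  intro m
  induction m with
  | zero => decide
  | succ k ih =>
      cases k with
      | zero => decide
      | succ j =>
          unfold primeira_alt
          rw [show ((j + 1 + 1 : Nat) : Int) + 1 = ((j : Int) + 1 + 1) + 1 by push_cast; ring]
          rw [PySem.List.pyRange_one_succ_right (by omega : (1:Int) ≤ (j:Int) + 1 + 1)]
          rw [List.foldl_append]
          have ih' : (PySem.List.pyRange 1 ((j:Int) + 1 + 1) 1).foldl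
              (fun st k =>
                let l1 := st.1 ++ [k]
                if k > 1 then (l1 ++ [k], st.2 ++ [k * k, k * k + 1]) else (l1, st.2))
              ([1], [1, 2]) = G (j + 1) := by
            have := ih
            unfold primeira_alt at this
            rw [show ((j + 1 : Nat) : Int) + 1 = (j : Int) + 1 + 1 by push_cast; ring] at this
            exact this
          rw [ih']
          have h2 : ((j : Int) + 1 + 1) > 1 := by omega
          simp only [List.foldl, if_pos h2, G]
          rw [show (j : Int) + 1 + 1 = (j : Int) + 2 by ring]
          simp [List.append_assoc]

-- A's first fold equals (G m).1
theorem a_fst_eq_G : ∀ m : Nat,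
    (PySem.List.pyRange 1 ((m : Int) + 1) 1).foldl
      (fun l numero =>
        if (PySem.List.pyGet? l (-1)).getD 0 = numero then l ++ [numero]
        else (l ++ [numero]) ++ [numero]) [1] = (G m).1 := by
  intro m
  induction m with
  | zero => decide
  | succ k ih =>
      rw [show ((k + 1 : Nat) : Int) + 1 = ((k : Int) + 1) + 1 by push_cast; ring]
      rw [PySem.List.pyRange_one_succ_right (by omega : (1:Int) ≤ (k:Int) + 1)]
      rw [List.foldl_append]
      rw [ih]
      cases k with
      | zero => decide
      | succ j =>
          have hlast := G_fst_last j
          simp only [List.foldl]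
          rw [hlast]
          have hne : ¬ ((j : Int) + 1 = ((j + 1 : Nat) : Int) + 1) := by push_cast; omega
          rw [if_neg hne]
          show _ = (G (j + 2)).1
          simp only [G]
          push_cast; simp [List.append_assoc]; omega

-- A's second fold over (G m).1 equals (G m).2
theorem a_snd_eq_G : ∀ m : Nat,
    (PySem.List.enumerate (G m).1 0).foldl
      (fun l2 p =>
        if p.1 > 1 ∧ p.1 % 2 = 0 then l2 ++ [p.2 ^ 2]
        else if p.1 > 1 ∧ p.1 % 2 ≠ 0 then l2 ++ [(PySem.List.pyGet? l2 (-1)).getD 0 + 1]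
        else l2) [1, 2] = (G m).2 := by
  intro m
  induction m with
  | zero => decide
  | succ k ih =>
      cases k with
      | zero => decide
      | succ j =>
          show (PySem.List.enumerate ((G (j+1)).1 ++ [(j : Int) + 2, (j : Int) + 2]) 0).foldl _ _ = _
          rw [PySem.List.enumerate_append]
          rw [List.foldl_append]
          rw [ih]
          have hlen : ((G (j+1)).1.length : Int) = 2 * ((j : Int) + 1) := by
            rw [G_fst_length j]; push_cast; ring
          simp only [PySem.List.enumerate, zero_add]
          rw [hlen]
          have he : (2 * ((j:Int)+1)) > 1 ∧ (2 * ((j:Int)+1)) % 2 = 0 := by omega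
          have ho1 : ¬ ((2 * ((j:Int)+1) + 1) > 1 ∧ (2 * ((j:Int)+1) + 1) % 2 = 0) := by omega
          have ho2 : (2 * ((j:Int)+1) + 1) > 1 ∧ (2 * ((j:Int)+1) + 1) % 2 ≠ 0 := by omega
          simp only [List.foldl, if_pos he, if_neg ho1, if_pos ho2]
          rw [show (G (j+1)).2 ++ [((j:Int)+2) ^ 2] = ((G (j+1)).2 ++ []) ++ [((j:Int)+2) ^ 2] by simp]
          rw [PySem.List.pyGet?_neg_one_append_singleton]
          show _ = (G (j + 2)).2
          simp only [G, Option.getD_some]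
          ring_nf; simp [List.append_assoc]

theorem a_eq_G : ∀ m : Nat, primeira (m : Int) = G m := by
  intro m
  unfold primeira
  simp only
  rw [a_fst_eq_G m, a_snd_eq_G m]

-- ===== VERDICT (by name: the statement is the Claim_ definition above) =====
theorem primeira_spec : Claim_equal_primeira := by
  intro entrada _
  show primeira entrada = primeira_alt entrada
  by_cases h : entrada ≤ 0
  · have hA : PySem.List.pyRange 1 (entrada + 1) 1 = [] :=
      PySem.List.pyRange_one_eq_nil (by omega)
    unfold primeira primeira_alt
    rw [hA]
    decide
  · have hm : entrada = (entrada.toNat : Int) := by omega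
    rw [hm, a_eq_G, alt_eq_G]
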